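-- pv_equiv track=rewrite | github.com/jmholleran/cit-129-2019-fall | NBA_FINAL_PROJECT/nbaML_2020.py | getTodayMatchupDict
-- ===== SOURCE A (Python) =====
-- def getTodayMatchupDict(homeTeams, awayTeams):
--
--     # Function purpose is to build a dictionary of the home and away teams
--
--     matchups = {}
--
--     for home in homeTeams:
--         for away in awayTeams:
--             matchups[home] = away
--             awayTeams.remove(away)
--             break
--
--     return matchups
-- ===== SOURCE B (Python) =====
-- def getTodayMatchupDict(homeTeams, awayTeams):
--     # Same return value as A; reproduces A's side effect (A consumes the first
--     # min(len(home),len(away)) elements of awayTeams) with one bulk deletion.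
--     n = min(len(homeTeams), len(awayTeams))
--     matchups = dict(zip(homeTeams[:n], awayTeams[:n]))
--     del awayTeams[:n]
--     return matchups
-- ===== Notes on version B (the rewrite author's own statement) =====
-- stated objective: faster
-- what changed: Replaces the nested loop that pops the front of awayTeams one element per home team (each list.remove is a linear shift) by a pre-computed count n = min(len(homeTeams), len(awayTeams)), a single dict(zip(...)) over the two prefixes, and one bulk del awayTeams[:n] for the side effect.
import Mathlib
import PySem

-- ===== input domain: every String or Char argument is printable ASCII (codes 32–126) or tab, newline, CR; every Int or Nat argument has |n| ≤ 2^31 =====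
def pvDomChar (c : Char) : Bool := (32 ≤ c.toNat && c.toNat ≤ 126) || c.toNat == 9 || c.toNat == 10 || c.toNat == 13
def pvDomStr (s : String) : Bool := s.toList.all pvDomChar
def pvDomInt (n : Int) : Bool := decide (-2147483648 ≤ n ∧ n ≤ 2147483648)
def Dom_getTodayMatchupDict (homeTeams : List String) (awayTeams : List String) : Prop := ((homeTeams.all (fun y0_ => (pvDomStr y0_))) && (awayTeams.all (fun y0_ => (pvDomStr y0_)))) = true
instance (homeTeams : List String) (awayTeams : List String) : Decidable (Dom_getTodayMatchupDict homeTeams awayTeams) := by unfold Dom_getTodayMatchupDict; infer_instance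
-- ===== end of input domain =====

-- B builds the dict in one shot from zip of the two prefixes instead of A's nested loop that
-- pops the front of awayTeams per home team; return value proved equal (A also empties the
-- consumed prefix of awayTeams in place — B reproduces that mutation in Python; the theorem here
-- is about the return value).

-- ===== PORT A =====
-- one step of A's outer loop: the inner 'for away in awayTeams: …; break' takes the current
-- front of awayTeams (if any), inserts, and removes it
def pvStepA (st : PySem.Dict String String × List String) (home : String) :
    PySem.Dict String String × List String :=
  match st.2 with
  | [] => st
  | away :: rest => (st.1.insert home away, rest)

def getTodayMatchupDict (homeTeams : List String) (awayTeams : List String) : List (String × String) :=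
  (homeTeams.foldl pvStepA (PySem.Dict.empty, awayTeams)).1.items

-- ===== PORT B =====
def getTodayMatchupDict_alt (homeTeams : List String) (awayTeams : List String) : List (String × String) :=
  let n := min homeTeams.length awayTeams.length
  -- dict(zip(homeTeams[:n], awayTeams[:n]))
  (((homeTeams.take n).zip (awayTeams.take n)).foldl
    (fun (d : PySem.Dict String String) p => d.insert p.1 p.2) PySem.Dict.empty).items

-- ===== PRECONDITION & SPEC =====
def Spec_getTodayMatchupDict (homeTeams : List String) (awayTeams : List String) (out : List (String × String)) : Prop := out = getTodayMatchupDict_alt homeTeams awayTeams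
instance (homeTeams : List String) (awayTeams : List String) (out : List (String × String)) : Decidable (Spec_getTodayMatchupDict homeTeams awayTeams out) := by unfold Spec_getTodayMatchupDict; infer_instance

-- ===== CLAIM (what is proved, stated in full; the proofs are below) =====
def Claim_equal_getTodayMatchupDict : Prop := ∀ (homeTeams : List String) (awayTeams : List String), Dom_getTodayMatchupDict homeTeams awayTeams → Spec_getTodayMatchupDict homeTeams awayTeams (getTodayMatchupDict homeTeams awayTeams)

-- ===== LEMMAS AND PROOFS =====

-- A's fold over (dict, remaining aways) is the fold of inserts over the zip
theorem foldA_eq_zip (h : List String) : ∀ (a : List String) (d : PySem.Dict String String),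
    (h.foldl pvStepA (d, a)).1 =
      (h.zip a).foldl (fun (d : PySem.Dict String String) p => d.insert p.1 p.2) d := by
  induction h with
  | nil => intro a d; rfl
  | cons home t ih =>
    intro a d
    cases a with
    | nil =>
      simp only [List.zip_nil_right, List.foldl_nil, List.foldl_cons, pvStepA]
      -- state stays (d, []) through the remaining fold
      clear ih
      induction t with
      | nil => rfl
      | cons x xs ih2 => simpa [pvStepA] using ih2
    | cons away rest =>
      simp only [List.foldl_cons, pvStepA, List.zip_cons_cons]
      exact ih rest (d.insert home away)

theorem zip_take_min (h a : List String) :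
    (h.take (min h.length a.length)).zip (a.take (min h.length a.length)) = h.zip a := by
  induction h generalizing a with
  | nil => simp
  | cons x t ih =>
    cases a with
    | nil => simp
    | cons y r => simpa using ih r

-- ===== VERDICT (by name: the statement is the Claim_ definition above) =====
theorem getTodayMatchupDict_spec : Claim_equal_getTodayMatchupDict := by
  intro homeTeams awayTeams _
  show _ = _
  show getTodayMatchupDict homeTeams awayTeams = _
  simp only [getTodayMatchupDict, getTodayMatchupDict_alt, zip_take_min, foldA_eq_zip]
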